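-- pv_equiv track=rewrite | github.com/xdsai/daisy | torrent_search.py | _is_adult_content
-- ===== SOURCE A (Python) =====
-- def _is_adult_content(title: str) -> bool:
--     """Check if title contains adult content keywords."""
--     adult_keywords = [
--         'xxx', 'porn', 'sex', 'adult', 'hentai', 'nsfw',
--         'nude', 'naked', 'erotic', '18+', 'milf', 'lesbian',
--         'anal', 'blowjob', 'cumshot', 'gangbang', 'orgy'
--     ]
--     title_lower = title.lower()
--     return any(keyword in title_lower for keyword in adult_keywords)
-- ===== SOURCE B (Python) =====
-- def _is_adult_content(title: str) -> bool:
--     """Check if title contains adult content keywords (single suffix-scan pass)."""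
--     adult_keywords = [
--         'xxx', 'porn', 'sex', 'adult', 'hentai', 'nsfw',
--         'nude', 'naked', 'erotic', '18+', 'milf', 'lesbian',
--         'anal', 'blowjob', 'cumshot', 'gangbang', 'orgy'
--     ]
--     t = title.lower()
--     for i in range(len(t) + 1):
--         if any(t.startswith(k, i) for k in adult_keywords):
--             return True
--     return False
-- ===== Notes on version B (the rewrite author's own statement) =====
-- stated objective: alternative
-- what changed: Replaces the per-keyword substring-containment tests with a single position-major scan: one loop over positions of the lowercased title testing keyword prefixes there via startswith(k, i).
import Mathlib
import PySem

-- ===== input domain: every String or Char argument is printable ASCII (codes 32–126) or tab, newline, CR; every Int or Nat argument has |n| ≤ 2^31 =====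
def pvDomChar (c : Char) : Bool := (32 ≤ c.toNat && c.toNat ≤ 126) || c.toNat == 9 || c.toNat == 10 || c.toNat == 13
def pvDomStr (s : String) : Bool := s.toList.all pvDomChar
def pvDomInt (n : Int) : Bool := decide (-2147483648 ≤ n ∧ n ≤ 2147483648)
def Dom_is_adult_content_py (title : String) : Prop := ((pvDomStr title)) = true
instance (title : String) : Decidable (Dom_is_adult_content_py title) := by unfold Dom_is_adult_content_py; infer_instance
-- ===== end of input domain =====

-- B replaces the per-keyword containment loop with one position-major suffix scan; objective: alternative (same cost).

def adultKeywords : List String :=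
  ["xxx", "porn", "sex", "adult", "hentai", "nsfw",
   "nude", "naked", "erotic", "18+", "milf", "lesbian",
   "anal", "blowjob", "cumshot", "gangbang", "orgy"]

-- ===== PORT A =====
def is_adult_content_py (title : String) : Bool :=
  let title_lower := PySem.Str.lower title
  adultKeywords.any (fun keyword => PySem.Str.isIn keyword title_lower)

-- ===== PORT B =====
def adultKeywordsChars : List (List Char) := adultKeywords.map String.toList

-- the 'for i in range(len(t)+1)' loop of Source B: at each position i, test keywords against the rest of the string (t.startswith(k, i)); recursion carries the rest directly
def scanSuffixes : List Char → Bool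
  | [] => adultKeywordsChars.any (fun k => PySem.Chars.startswith [] k)
  | c :: rest =>
      if adultKeywordsChars.any (fun k => PySem.Chars.startswith (c :: rest) k) then true
      else scanSuffixes rest

def is_adult_content_py_alt (title : String) : Bool :=
  scanSuffixes (PySem.Str.lower title).toList

-- ===== PRECONDITION & SPEC =====
def Spec_is_adult_content_py (title : String) (out : Bool) : Prop := out = is_adult_content_py_alt title
instance (title : String) (out : Bool) : Decidable (Spec_is_adult_content_py title out) := by unfold Spec_is_adult_content_py; infer_instance

-- ===== CLAIM (what is proved, stated in full; the proofs are below) =====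
def Claim_equal_is_adult_content_py : Prop := ∀ (title : String), Dom_is_adult_content_py title → Spec_is_adult_content_py title (is_adult_content_py title)

-- ===== LEMMAS AND PROOFS =====

lemma scanSuffixes_iff (s : List Char) :
    scanSuffixes s = true ↔ ∃ k ∈ adultKeywordsChars, ∃ suf, suf <:+ s ∧ k <+: suf := by
  induction s with
  | nil =>
      simp only [scanSuffixes]
      constructor
      · intro h
        rcases List.any_eq_true.mp h with ⟨k, hk, hp⟩
        exact ⟨k, hk, [], List.suffix_refl _, (PySem.Chars.startswith_iff _ _).mp hp⟩
      · rintro ⟨k, hk, suf, hsuf, hp⟩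
        rw [List.suffix_nil] at hsuf
        subst hsuf
        exact List.any_eq_true.mpr ⟨k, hk, (PySem.Chars.startswith_iff _ _).mpr hp⟩
  | cons c rest ih =>
      simp only [scanSuffixes]
      by_cases h : adultKeywordsChars.any (fun k => PySem.Chars.startswith (c :: rest) k) = true
      · simp only [h, if_true, true_iff]
        rcases List.any_eq_true.mp h with ⟨k, hk, hp⟩
        exact ⟨k, hk, c :: rest, List.suffix_refl _, (PySem.Chars.startswith_iff _ _).mp hp⟩
      · rw [Bool.not_eq_true] at h
        simp only [h, Bool.false_eq_true, if_false, ih]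
        constructor
        · rintro ⟨k, hk, suf, hsuf, hp⟩
          exact ⟨k, hk, suf, hsuf.trans (List.suffix_cons _ _), hp⟩
        · rintro ⟨k, hk, suf, hsuf, hp⟩
          rcases List.suffix_cons_iff.mp hsuf with heq | hsuf'
          · exfalso
            have : adultKeywordsChars.any (fun k => PySem.Chars.startswith (c :: rest) k) = true :=
              List.any_eq_true.mpr ⟨k, hk, (PySem.Chars.startswith_iff _ _).mpr (heq ▸ hp)⟩
            simp [h] at this
          · exact ⟨k, hk, suf, hsuf', hp⟩

lemma scanSuffixes_eq_any_isIn (s : List Char) :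
    scanSuffixes s = adultKeywordsChars.any (fun k => PySem.Chars.isIn k s) := by
  rw [Bool.eq_iff_iff, scanSuffixes_iff, List.any_eq_true]
  constructor
  · rintro ⟨k, hk, suf, hsuf, hp⟩
    exact ⟨k, hk, (PySem.Chars.isIn_iff_infix _ _).mpr (List.infix_iff_prefix_suffix.mpr ⟨suf, hp, hsuf⟩)⟩
  · rintro ⟨k, hk, hin⟩
    rcases List.infix_iff_prefix_suffix.mp ((PySem.Chars.isIn_iff_infix _ _).mp hin) with ⟨t, hp, hs⟩
    exact ⟨k, hk, t, hs, hp⟩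

-- ===== VERDICT (by name: the statement is the Claim_ definition above) =====
theorem is_adult_content_py_spec : Claim_equal_is_adult_content_py := by
  intro title _
  unfold Spec_is_adult_content_py is_adult_content_py is_adult_content_py_alt
  rw [scanSuffixes_eq_any_isIn]
  simp [adultKeywordsChars, List.any_map, Function.comp_def, PySem.Str.isIn]
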